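-- pv_equiv track=rewrite | github.com/y24/TestProgressRecord | libs/DataAggregation.py | get_daily
-- ===== SOURCE A (Python) =====
-- from collections import defaultdict
--
-- def get_daily(data, filter: list[str]):
--     total_label = "Completed"
--     result_count = defaultdict(lambda: defaultdict(int))
--
--     for row in data:
--         result, name, date = row
--
--         # 日付が空のデータはスキップ
--         if not date:
--             continue
--
--         # 各結果を0で初期化
--         for keyword in filter:
--             result_count[date][keyword] = result_count[date].get(keyword, 0)
--         result_count[date][total_label] = result_count[date].get(total_label, 0)
--
--         # 結果列がフィルタ文字列に合致するものだけ抽出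
--         if result in filter:
--             result_count[date][result] += 1
--             result_count[date][total_label] += 1
--
--     # 出力
--     aggregated_results = {}
--     for date, counts in sorted(result_count.items()):
--         counts = {**counts}
--         aggregated_results[date] = counts
--
--     return aggregated_results
-- ===== SOURCE B (Python) =====
-- def get_daily(data, filter: list[str]):
--     # Column order: every filter keyword, then "Completed" (which is always present).
--     keys = list(filter)
--     if "Completed" not in keys:
--         keys.append("Completed")
--     out = {}
--     for d in sorted({date for _, _, date in data if date}):
--         matched = [r for r, _, date in data if date == d and r in filter]
--         out[d] = {k: matched.count(k) + (len(matched) if k == "Completed" else 0)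
--                   for k in keys}
--     return out
-- ===== Notes on version B (the rewrite author's own statement) =====
-- stated objective: alternative
-- what changed: Replaces A's incremental dict-of-dicts pass (per-row zero-initialization of every key plus in-place increments) by a direct recount: collect the distinct non-empty dates, sort them, and for each date build its row by counting occurrences in the filtered matched-row list with list.count; trades the single stateful pass for stateless per-date recounts.
import Mathlib
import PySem

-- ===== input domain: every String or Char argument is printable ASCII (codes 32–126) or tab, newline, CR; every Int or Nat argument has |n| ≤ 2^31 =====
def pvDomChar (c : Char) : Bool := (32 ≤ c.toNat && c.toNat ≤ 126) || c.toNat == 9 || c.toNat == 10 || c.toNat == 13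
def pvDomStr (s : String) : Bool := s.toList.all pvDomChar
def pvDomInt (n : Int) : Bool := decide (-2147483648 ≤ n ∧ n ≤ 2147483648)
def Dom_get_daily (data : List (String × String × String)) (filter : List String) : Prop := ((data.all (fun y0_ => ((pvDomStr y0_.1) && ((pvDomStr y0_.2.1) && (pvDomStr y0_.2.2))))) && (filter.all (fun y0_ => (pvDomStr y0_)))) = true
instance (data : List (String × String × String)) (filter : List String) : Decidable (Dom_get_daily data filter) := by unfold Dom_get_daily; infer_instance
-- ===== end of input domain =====

-- B replaces A's incremental dict-of-dicts counting pass by a direct per-date recount: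
-- it sorts the distinct non-empty dates and, for each, counts matching rows with
-- list.count over the filtered row list; the return values are proved identical.

-- ===== PORT A =====
def get_daily_row (filter : List String) (result_count : PySem.Dict String (PySem.Dict String Int))
    (row : String × String × String) : PySem.Dict String (PySem.Dict String Int) :=
  let result := row.1
  let date := row.2.2
  if date = "" then result_count
  else
    let inner := result_count.getD date PySem.Dict.empty
    let inner := filter.foldl (fun inner keyword => inner.insert keyword (inner.getD keyword 0)) inner
    let inner := inner.insert "Completed" (inner.getD "Completed" 0)
    let inner := if filter.contains result then
        (inner.modify result 0 (· + 1)).modify "Completed" 0 (· + 1)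
      else inner
    result_count.insert date inner

def get_daily (data : List (String × String × String)) (filter : List String) : List (String × List (String × Int)) :=
  let result_count := data.foldl (get_daily_row filter) PySem.Dict.empty
  -- sorted(result_count.items()): the first components (dict keys) are pairwise distinct, so
  -- Python's tuple comparison orders the pairs by the date key alone — ported as a key sort on .1
  (PySem.List.sorted result_count.items (fun p => p.1)).map (fun p => (p.1, p.2.items))

-- ===== PORT B =====
def get_daily_alt (data : List (String × String × String)) (filter : List String) : List (String × List (String × Int)) :=
  let keys := if filter.contains "Completed" then filter else filter ++ ["Completed"]
  let dates := PySem.Set.ofList (data.filterMap (fun r => if r.2.2 = "" then none else some r.2.2))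
  (PySem.List.sorted dates (fun d => d)).map (fun d =>
    let matched := data.filterMap (fun r => if r.2.2 = d && filter.contains r.1 then some r.1 else none)
    (d, (keys.foldl (fun row k =>
        row.insert k (PySem.List.count matched k + if k = "Completed" then (matched.length : Int) else 0))
      PySem.Dict.empty).items))

-- ===== PRECONDITION & SPEC =====
def Spec_get_daily (data : List (String × String × String)) (filter : List String) (out : List (String × List (String × Int))) : Prop := out = get_daily_alt data filter
instance (data : List (String × String × String)) (filter : List String) (out : List (String × List (String × Int))) : Decidable (Spec_get_daily data filter out) := by unfold Spec_get_daily; infer_instance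

-- ===== CLAIM =====
def Claim_equal_get_daily : Prop := ∀ (data : List (String × String × String)) (filter : List String), Dom_get_daily data filter → Spec_get_daily data filter (get_daily data filter)

-- ===== LEMMAS AND PROOFS =====

-- the non-empty dates of a data prefix, in order of appearance
def dlist (p : List (String × String × String)) : List String :=
  p.filterMap (fun r => if r.2.2 = "" then none else some r.2.2)

-- the matched result values of a data prefix for a fixed date
def mlist (f : List String) (p : List (String × String × String)) (d : String) : List String :=
  p.filterMap (fun r => if r.2.2 = d && f.contains r.1 then some r.1 else none)

-- the value B computes for key k of a date whose matched list is m
def rowVal (m : List String) (k : String) : Int :=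
  PySem.List.count m k + if k = "Completed" then (m.length : Int) else 0

def keyItems (f : List String) (m : List String) : List (String × Int) :=
  (PySem.Set.ofList (f ++ ["Completed"])).map (fun k => (k, rowVal m k))

lemma getD_zero_of_items_zero (d : PySem.Dict String Int)
    (h : ∀ p ∈ d.items, p.2 = (0 : Int)) (k : String) : d.getD k 0 = 0 := by
  rw [PySem.Dict.getD_eq_get?_getD]
  cases hk : d.get? k with
  | none => rfl
  | some v => exact h _ (PySem.Dict.mem_items_of_get?_eq_some d hk)

lemma keys_of_items_map {ν : Type} (d : PySem.Dict String ν) (K : List String) (V : String → ν)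
    (h : d.items = K.map (fun k => (k, V k))) : d.keys = K := by
  simp [PySem.Dict.keys, h, List.map_map, Function.comp_def]

lemma insert_mapform {ν : Type} (d : PySem.Dict String ν) (K : List String) (V : String → ν)
    (h : d.items = K.map (fun k => (k, V k))) (k0 : String) (hk0 : k0 ∈ K) (v : ν) :
    (d.insert k0 v).items = K.map (fun k => (k, if k = k0 then v else V k)) := by
  have hc : d.contains k0 = true := by
    rw [PySem.Dict.contains_eq_decide_mem_keys, keys_of_items_map d K V h]
    simpa using hk0
  rw [PySem.Dict.items_insert_of_contains d v hc, h, List.map_map]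
  apply List.map_congr_left
  intro k hk
  by_cases hkk : k = k0 <;> simp [hkk]

lemma getD_mapform {ν : Type} (d : PySem.Dict String ν) (K : List String) (V : String → ν)
    (h : d.items = K.map (fun k => (k, V k))) (hnd : K.Nodup) (k0 : String) (hk0 : k0 ∈ K) (d0 : ν) :
    d.getD k0 d0 = V k0 := by
  have hm : (k0, V k0) ∈ d.items := by rw [h]; exact List.mem_map_of_mem hk0
  exact PySem.Dict.getD_of_mem_items d hm (by rw [keys_of_items_map d K V h]; exact hnd) d0

lemma insert_getD_self {ν : Type} (d : PySem.Dict String ν) (hnd : d.keys.Nodup) (k : String)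
    (hc : d.contains k = true) (d0 : ν) : d.insert k (d.getD k d0) = d := by
  apply PySem.Dict.ext
  rw [PySem.Dict.items_insert_of_contains d _ hc]
  have h1 : ∀ p ∈ d.items,
      (fun p : String × ν => if (p.1 == k) = true then (k, d.getD k d0) else p) p = id p := by
    intro p hp
    obtain ⟨p1, p2⟩ := p
    by_cases hpk : p1 = k
    · subst hpk
      have hg : d.get? p1 = some p2 := PySem.Dict.get?_of_mem_items d hp hnd
      simp [PySem.Dict.getD_of_get?_eq_some d d0 hg]
    · simp [hpk]
  rw [List.map_congr_left h1, List.map_id]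

-- B's fold of inserts of V-values over a key list, as a map over the deduped keys
lemma fold_insertV (V : String → Int) (l : List String) :
    ∀ (K : List String) (d : PySem.Dict String Int),
    d.items = K.map (fun k => (k, V k)) →
    (l.foldl (fun row k => row.insert k (V k)) d).items
      = (PySem.Set.update K l).map (fun k => (k, V k)) := by
  induction l with
  | nil => intro K d h; simpa [PySem.Set.update] using h
  | cons k l ih =>
      intro K d h
      rw [List.foldl_cons, PySem.Set.update_cons]
      by_cases hk : k ∈ K
      · have h2 : (d.insert k (V k)).items = K.map (fun j => (j, V j)) := by
          rw [insert_mapform d K _ h k hk]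
          apply List.map_congr_left
          intro j hj
          by_cases hjk : j = k <;> simp [hjk]
        rw [PySem.Set.add_of_mem hk]
        exact ih K _ h2
      · have hc : d.contains k = false := by
          rw [PySem.Dict.contains_eq_decide_mem_keys, keys_of_items_map d K _ h]
          simpa using hk
        have h2 : (d.insert k (V k)).items = (K ++ [k]).map (fun j => (j, V j)) := by
          rw [PySem.Dict.items_insert_of_not_contains d _ hc, h]; simp
        rw [PySem.Set.add_of_not_mem hk]
        exact ih (K ++ [k]) _ h2

-- A's zero-init fold on a dict of zeros
lemma coreA (f : List String) :
    ∀ (K : List String) (d : PySem.Dict String Int),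
    d.items = K.map (fun k => (k, (0 : Int))) →
    (f.foldl (fun inner keyword => inner.insert keyword (inner.getD keyword 0)) d).items
      = (PySem.Set.update K f).map (fun k => (k, (0 : Int))) := by
  induction f with
  | nil => intro K d h; simpa [PySem.Set.update] using h
  | cons k f ih =>
      intro K d h
      have hz : d.getD k 0 = 0 := by
        apply getD_zero_of_items_zero
        intro p hp; rw [h] at hp
        obtain ⟨j, hj, rfl⟩ := List.mem_map.mp hp; rfl
      rw [List.foldl_cons, PySem.Set.update_cons, hz]
      by_cases hk : k ∈ K
      · have h2 : (d.insert k 0).items = K.map (fun j => (j, (0 : Int))) := by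
          rw [insert_mapform d K _ h k hk]
          apply List.map_congr_left
          intro j hj
          by_cases hjk : j = k <;> simp [hjk]
        rw [PySem.Set.add_of_mem hk]
        exact ih K _ h2
      · have hc : d.contains k = false := by
          rw [PySem.Dict.contains_eq_decide_mem_keys, keys_of_items_map d K _ h]
          simpa using hk
        have h2 : (d.insert k 0).items = (K ++ [k]).map (fun j => (j, (0 : Int))) := by
          rw [PySem.Dict.items_insert_of_not_contains d _ hc, h]; simp
        rw [PySem.Set.add_of_not_mem hk]
        exact ih (K ++ [k]) _ h2

lemma initfold_id (f : List String) :
    ∀ (d : PySem.Dict String Int), d.keys.Nodup → (∀ k ∈ f, d.contains k = true) →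
    f.foldl (fun inner keyword => inner.insert keyword (inner.getD keyword 0)) d = d := by
  induction f with
  | nil => intro d _ _; rfl
  | cons k f ih =>
      intro d hnd hall
      rw [List.foldl_cons, insert_getD_self d hnd k (hall k (by simp)) 0]
      exact ih d hnd (fun j hj => hall j (by simp [hj]))

lemma rowVal_nil (k : String) : rowVal [] k = 0 := by
  simp [rowVal, PySem.List.count_eq]

-- A's per-row initialisation on a fresh date produces the all-zero row = keyItems f []
lemma initA_items (f : List String) :
    (((f.foldl (fun inner keyword => inner.insert keyword (inner.getD keyword 0))
        (PySem.Dict.empty : PySem.Dict String Int))).insert "Completed"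
      ((f.foldl (fun inner keyword => inner.insert keyword (inner.getD keyword 0))
        (PySem.Dict.empty : PySem.Dict String Int)).getD "Completed" 0)).items
      = keyItems f [] := by
  have h1 := coreA f [] PySem.Dict.empty (by rfl)
  rw [PySem.Set.update_nil_left] at h1
  have hz : (f.foldl (fun inner keyword => inner.insert keyword (inner.getD keyword 0))
      (PySem.Dict.empty : PySem.Dict String Int)).getD "Completed" 0 = 0 := by
    apply getD_zero_of_items_zero
    intro p hp; rw [h1] at hp
    obtain ⟨j, hj, rfl⟩ := List.mem_map.mp hp; rfl
  rw [hz]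
  unfold keyItems
  rw [PySem.Set.ofList_append_singleton]
  by_cases hC : "Completed" ∈ PySem.Set.ofList f
  · rw [PySem.Set.add_of_mem hC, insert_mapform _ _ _ h1 _ hC]
    apply List.map_congr_left
    intro j hj
    by_cases hjC : j = "Completed" <;> simp [hjC, rowVal_nil]
  · have hc : (f.foldl (fun inner keyword => inner.insert keyword (inner.getD keyword 0))
        (PySem.Dict.empty : PySem.Dict String Int)).contains "Completed" = false := by
      rw [PySem.Dict.contains_eq_decide_mem_keys, keys_of_items_map _ _ _ h1]
      simpa using hC
    rw [PySem.Set.add_of_not_mem hC, PySem.Dict.items_insert_of_not_contains _ _ hc, h1]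
    simp [rowVal_nil]

-- counting a matched row: the two A-side increments extend the matched list by its result
lemma matchstep (f : List String) (m : List String)
    (d : PySem.Dict String Int) (hd : d.items = keyItems f m) (r : String) (hr : r ∈ f) :
    ((d.modify r 0 (· + 1)).modify "Completed" 0 (· + 1)).items
      = keyItems f (m ++ [r]) := by
  set K := PySem.Set.ofList (f ++ ["Completed"]) with hK
  have hnd : K.Nodup := PySem.Set.nodup_ofList _
  have hrK : r ∈ K := by rw [hK, PySem.Set.mem_ofList]; exact List.mem_append_left _ hr
  have hCK : "Completed" ∈ K := by rw [hK, PySem.Set.mem_ofList]; simp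
  have hd' : d.items = K.map (fun k => (k, rowVal m k)) := hd
  simp only [PySem.Dict.modify]
  have hg1 : d.getD r 0 = rowVal m r := getD_mapform d K _ hd' hnd r hrK 0
  have h1 : (d.insert r (d.getD r 0 + 1)).items
      = K.map (fun k => (k, if k = r then rowVal m r + 1 else rowVal m k)) := by
    rw [hg1] at *; exact insert_mapform d K _ hd' r hrK _
  set V1 : String → Int := fun k => if k = r then rowVal m r + 1 else rowVal m k with hV1
  have hg2 : (d.insert r (d.getD r 0 + 1)).getD "Completed" 0 = V1 "Completed" :=
    getD_mapform _ K V1 h1 hnd _ hCK 0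
  have h2 : ((d.insert r (d.getD r 0 + 1)).insert "Completed"
      ((d.insert r (d.getD r 0 + 1)).getD "Completed" 0 + 1)).items
      = K.map (fun k => (k, if k = "Completed" then V1 "Completed" + 1 else V1 k)) := by
    rw [hg2] at *; exact insert_mapform _ K V1 h1 _ hCK _
  rw [h2]
  unfold keyItems
  apply List.map_congr_left
  intro j hj
  simp only [hV1, rowVal, PySem.List.count_eq, List.count_append, List.count_cons,
    List.count_nil, List.length_append, Prod.mk.injEq, true_and]
  rcases eq_or_ne j "Completed" with hjC | hjC <;> rcases eq_or_ne j r with hjr | hjr <;>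
    simp_all
  all_goals first
    | omega
    | (intro h; exact hjr h.symm)
    | (split_ifs <;> first | omega | simp_all)

lemma mem_dlist_ne_empty (p : List (String × String × String)) (d : String)
    (hd : d ∈ dlist p) : d ≠ "" := by
  obtain ⟨r, _, hsome⟩ := List.mem_filterMap.mp hd
  by_cases h : r.2.2 = ""
  · simp [h] at hsome
  · simp [h] at hsome
    exact hsome ▸ h

lemma mlist_nil_of_not_mem (f : List String) (p : List (String × String × String)) (d : String)
    (hd : d ∉ dlist p) (hne : d ≠ "") : mlist f p d = [] := by
  rw [mlist, List.filterMap_eq_nil_iff]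
  intro r hr
  by_cases h : r.2.2 = d
  · exact absurd (List.mem_filterMap.mpr ⟨r, hr, by rw [h]; simp [hne]⟩) hd
  · simp [h]

def DailyInv (f : List String) (p : List (String × String × String))
    (rc : PySem.Dict String (PySem.Dict String Int)) : Prop :=
  rc.keys = PySem.Set.ofList (dlist p) ∧
  ∀ d ∈ rc.keys, (rc.getD d PySem.Dict.empty).items = keyItems f (mlist f p d)

lemma step_inv (f : List String) (p : List (String × String × String))
    (rc : PySem.Dict String (PySem.Dict String Int)) (h : DailyInv f p rc)
    (row : String × String × String) :
    DailyInv f (p ++ [row]) (get_daily_row f rc row) := by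
  obtain ⟨hk, hitems⟩ := h
  obtain ⟨r, n, dt⟩ := row
  have hdl : dlist (p ++ [(r, n, dt)]) = dlist p ++ (if dt = "" then [] else [dt]) := by
    rw [dlist, List.filterMap_append]
    by_cases hdt : dt = "" <;> simp [dlist, hdt]
  have hml : ∀ d, mlist f (p ++ [(r, n, dt)]) d
      = mlist f p d ++ (if dt = d ∧ f.contains r then [r] else []) := by
    intro d
    rw [mlist, List.filterMap_append]
    congr 1
    by_cases h1 : dt = d <;> by_cases h2 : f.contains r = true <;>
      simp [h1] <;> simp_all
  by_cases hdt : dt = ""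
  · subst hdt
    have hrow : get_daily_row f rc (r, n, "") = rc := by simp [get_daily_row]
    rw [hrow]
    refine ⟨by simpa [hdl] using hk, ?_⟩
    intro d hd
    rw [hml d]
    have hne : d ≠ "" := mem_dlist_ne_empty p d (by
      rw [hk] at hd; simpa [PySem.Set.mem_ofList] using hd)
    rw [if_neg (by rintro ⟨h1, _⟩; exact hne h1.symm)]
    simpa using hitems d hd
  -- dt ≠ "" : the row is processed
  have hdl' : dlist (p ++ [(r, n, dt)]) = dlist p ++ [dt] := by rw [hdl, if_neg hdt]
  by_cases hmem : dt ∈ rc.keys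
  case pos =>
    have hcc : rc.contains dt = true := by
      rw [PySem.Dict.contains_eq_decide_mem_keys]; simpa using hmem
    have hin := hitems dt hmem
    set inner0 := rc.getD dt PySem.Dict.empty with hinner0
    have hkeys0 : inner0.keys = PySem.Set.ofList (f ++ ["Completed"]) :=
      keys_of_items_map _ _ _ hin
    have hnd0 : inner0.keys.Nodup := by rw [hkeys0]; exact PySem.Set.nodup_ofList _
    have hallf : ∀ k ∈ f, inner0.contains k = true := by
      intro k hkk
      rw [PySem.Dict.contains_eq_decide_mem_keys, hkeys0]
      simp [PySem.Set.mem_ofList, hkk]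
    have hCc : inner0.contains "Completed" = true := by
      rw [PySem.Dict.contains_eq_decide_mem_keys, hkeys0]
      simp [PySem.Set.mem_ofList]
    have hinit : (f.foldl (fun inner keyword => inner.insert keyword (inner.getD keyword 0)) inner0)
        = inner0 := initfold_id f inner0 hnd0 hallf
    have hmem' : dt ∈ PySem.Set.ofList (dlist p) := by rwa [← hk]
    constructor
    · simp only [get_daily_row, if_neg hdt, hinit, ← hinner0,
        insert_getD_self inner0 hnd0 "Completed" hCc 0]
      rw [PySem.Dict.keys_insert_of_contains rc _ hcc, hk, hdl',
        PySem.Set.ofList_append_singleton, PySem.Set.add_of_mem hmem']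
    · intro d hd
      simp only [get_daily_row, if_neg hdt, hinit, ← hinner0,
        insert_getD_self inner0 hnd0 "Completed" hCc 0] at hd ⊢
      rw [PySem.Dict.keys_insert_of_contains rc _ hcc] at hd
      rw [hml d]
      by_cases hddt : d = dt
      · subst hddt
        rw [PySem.Dict.getD_insert, if_pos rfl]
        by_cases hm : f.contains r
        · have hrf : r ∈ f := by simpa using hm
          rw [if_pos hm, if_pos ⟨rfl, hm⟩]
          exact matchstep f (mlist f p d) inner0 hin r hrf
        · rw [if_neg hm, if_neg (by rintro ⟨_, h2⟩; exact hm h2)]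
          simpa using hin
      · rw [PySem.Dict.getD_insert, if_neg hddt,
          if_neg (by rintro ⟨h1, _⟩; exact hddt h1.symm)]
        simpa using hitems d hd
  case neg =>
    have hcc : rc.contains dt = false := by
      rw [PySem.Dict.contains_eq_decide_mem_keys]; simpa using hmem
    have hinner0 : rc.getD dt PySem.Dict.empty = PySem.Dict.empty :=
      PySem.Dict.getD_of_not_contains rc PySem.Dict.empty hcc
    have hmempty : mlist f p dt = [] :=
      mlist_nil_of_not_mem f p dt (by rwa [hk, PySem.Set.mem_ofList] at hmem) hdt
    have hinit : _ = keyItems f [] := initA_items f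
    constructor
    · simp only [get_daily_row, if_neg hdt]
      rw [PySem.Dict.keys_insert_of_not_contains rc _ hcc, hk, hdl',
        PySem.Set.ofList_append_singleton,
        PySem.Set.add_of_not_mem (by rwa [← hk])]
    · intro d hd
      simp only [get_daily_row, if_neg hdt, hinner0] at hd ⊢
      rw [PySem.Dict.keys_insert_of_not_contains rc _ hcc] at hd
      rw [hml d]
      by_cases hddt : d = dt
      · subst hddt
        rw [PySem.Dict.getD_insert, if_pos rfl, hmempty]
        by_cases hm : f.contains r
        · have hrf : r ∈ f := by simpa using hm
          rw [if_pos hm, if_pos ⟨rfl, hm⟩]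
          exact matchstep f [] _ hinit r hrf
        · rw [if_neg hm, if_neg (by rintro ⟨_, h2⟩; exact hm h2)]
          simpa using hinit
      · have hdmem : d ∈ rc.keys := by
          rcases List.mem_append.mp hd with h' | h'
          · exact h'
          · exact absurd (List.mem_singleton.mp h') hddt
        rw [PySem.Dict.getD_insert, if_neg hddt,
          if_neg (by rintro ⟨h1, _⟩; exact hddt h1.symm)]
        simpa using hitems d hdmem

lemma loop_inv (f : List String) (data : List (String × String × String)) :
    ∀ (p : List (String × String × String)) (rc : PySem.Dict String (PySem.Dict String Int)),
    DailyInv f p rc → DailyInv f (p ++ data) (data.foldl (get_daily_row f) rc) := by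
  induction data with
  | nil => intro p rc h; simpa using h
  | cons row rest ih =>
      intro p rc h
      have := ih (p ++ [row]) _ (step_inv f p rc h row)
      simpa using this

lemma output_eq (f : List String) (data : List (String × String × String))
    (rc : PySem.Dict String (PySem.Dict String Int)) (h : DailyInv f data rc) :
    (PySem.List.sorted rc.items (fun p => p.1)).map (fun p => (p.1, p.2.items))
      = (PySem.List.sorted (PySem.Set.ofList (dlist data)) (fun d => d)).map
          (fun d => (d, keyItems f (mlist f data d))) := by
  obtain ⟨hk, hitems⟩ := h
  have hnd : rc.keys.Nodup := by rw [hk]; exact PySem.Set.nodup_ofList _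
  set S := PySem.List.sorted (PySem.Set.ofList (dlist data)) (fun d => d) with hS
  have hSperm : S.Perm rc.keys := hk ▸ PySem.List.sorted_perm _ _ _
  have hSnodup : S.Nodup := hSperm.nodup_iff.mpr hnd
  have hSle : S.Pairwise (fun a b => a ≤ b) := PySem.List.sorted_pairwise _ _
  have hSlt : S.Pairwise (fun a b => a < b) :=
    (hSle.and hSnodup).imp (fun hp => lt_of_le_of_ne hp.1 hp.2)
  have hitemsrc : rc.items = rc.keys.map (fun k => (k, rc.getD k PySem.Dict.empty)) :=
    PySem.Dict.items_eq_map_keys rc hnd PySem.Dict.empty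
  set ys := S.map (fun k => (k, rc.getD k PySem.Dict.empty)) with hys
  have hperm : ys.Perm rc.items := by
    rw [hitemsrc]
    exact hSperm.map _
  have hpw : ys.Pairwise (fun a b => a.1 < b.1) := by
    rw [hys]
    exact (List.pairwise_map).mpr hSlt
  have hsorted : PySem.List.sorted rc.items (fun p => p.1) = ys :=
    PySem.List.sorted_eq_of_perm_of_pairwise_lt rc.items ys (fun p => p.1) hperm hpw
  rw [hsorted, hys, List.map_map]
  apply List.map_congr_left
  intro d hd
  have hdk : d ∈ rc.keys := hSperm.mem_iff.mp hd
  simp [hitems d hdk]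

-- B's per-date row assembly yields keyItems
lemma assembleB_items (f : List String) (m : List String) :
    ((if f.contains "Completed" then f else f ++ ["Completed"]).foldl (fun row k =>
        row.insert k (PySem.List.count m k + if k = "Completed" then (m.length : Int) else 0))
      PySem.Dict.empty).items = keyItems f m := by
  have h := fold_insertV (rowVal m) (if f.contains "Completed" then f else f ++ ["Completed"])
      [] PySem.Dict.empty (by rfl)
  rw [PySem.Set.update_nil_left] at h
  have h' : ((if f.contains "Completed" then f else f ++ ["Completed"]).foldl (fun row k =>
        row.insert k (PySem.List.count m k + if k = "Completed" then (m.length : Int) else 0))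
      PySem.Dict.empty).items
      = (PySem.Set.ofList (if f.contains "Completed" then f else f ++ ["Completed"])).map
          (fun k => (k, rowVal m k)) := h
  rw [h']
  unfold keyItems
  by_cases hC : f.contains "Completed"
  · have hCm : "Completed" ∈ PySem.Set.ofList f := by
      rw [PySem.Set.mem_ofList]; simpa using hC
    rw [if_pos hC, PySem.Set.ofList_append_singleton, PySem.Set.add_of_mem hCm]
  · rw [if_neg hC]

-- ===== VERDICT =====
theorem get_daily_spec : Claim_equal_get_daily := by
  intro data f _
  unfold Spec_get_daily get_daily get_daily_alt
  have hinv : DailyInv f [] PySem.Dict.empty := by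
    refine ⟨rfl, ?_⟩
    intro d hd
    simp [PySem.Dict.keys, PySem.Dict.empty] at hd
  have h := loop_inv f data [] PySem.Dict.empty hinv
  rw [List.nil_append] at h
  rw [output_eq f data _ h]
  apply List.map_congr_left
  intro d hd
  exact congrArg (Prod.mk d) (assembleB_items f (mlist f data d)).symm
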